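-- pv_equiv track=rewrite | github.com/whyj107/Algorithm | CodeWar/20210212_Pathfinder Ability Scores Calculator.py | pathfinder_scores
-- ===== SOURCE A (Python) =====
-- def pathfinder_scores(scores):
--     cost = {7: -4, 8: -2, 9: -1, 10: 0, 11: 1, 12: 2,
--             13: 3, 14: 5, 15: 7, 16: 10, 17: 13, 18: 17}
--     answer = []
--     for score in scores:
--         if score < 7 or score > 18:
--             return False
--         answer.append(cost[score])
--     return sum(answer) <= 25
-- ===== SOURCE B (Python) =====
-- def pathfinder_scores(scores):
--     cost = {7: -4, 8: -2, 9: -1, 10: 0, 11: 1, 12: 2,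
--             13: 3, 14: 5, 15: 7, 16: 10, 17: 13, 18: 17}
--     # histogram pass: how many times each distinct score occurs
--     counts = {}
--     for s in scores:
--         counts[s] = counts.get(s, 0) + 1
--     # valid iff every distinct score is a key of the cost table
--     if any(v not in cost for v in counts):
--         return False
--     # weighted sum over the 12 table entries, not over the score list
--     return sum(c * counts.get(v, 0) for v, c in cost.items()) <= 25
-- ===== Notes on version B (the rewrite author's own statement) =====
-- stated objective: alternative
-- what changed: Replaced A's per-element validate-and-accumulate loop by a histogram algorithm: B builds a frequency table of the scores once, validates by checking that every distinct score is a key of the cost table, and computes the total as a weighted sum (cost * multiplicity) over the 12 fixed cost-table entries instead of summing per list element.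
import Mathlib
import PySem

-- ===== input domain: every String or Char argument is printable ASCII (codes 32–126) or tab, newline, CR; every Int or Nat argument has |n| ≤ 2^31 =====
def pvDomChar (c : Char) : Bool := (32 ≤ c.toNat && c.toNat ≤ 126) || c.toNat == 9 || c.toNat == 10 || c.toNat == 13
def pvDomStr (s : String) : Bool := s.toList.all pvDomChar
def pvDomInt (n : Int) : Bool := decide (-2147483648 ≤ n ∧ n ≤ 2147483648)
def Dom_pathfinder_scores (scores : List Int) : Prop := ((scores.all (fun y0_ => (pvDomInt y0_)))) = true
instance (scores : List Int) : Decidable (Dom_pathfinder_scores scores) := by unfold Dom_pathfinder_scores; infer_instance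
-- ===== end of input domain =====

-- B replaces A's validate-and-accumulate loop by a histogram algorithm: build a frequency table of the scores, validate the distinct values against the cost table's keys, and total via a weighted sum over the 12 cost entries; same return value, no speed claim.


-- ===== PORT A =====
-- the cost dict, shared by both Pythons, ported as a PySem.Dict
def pfCost : PySem.Dict Int Int :=
  PySem.Dict.ofList [(7, -4), (8, -2), (9, -1), (10, 0), (11, 1), (12, 2),
   (13, 3), (14, 5), (15, 7), (16, 10), (17, 13), (18, 17)]

-- A's loop: append cost[score] to answer, early-return False on out-of-range
def pathfinderLoopA (scores : List Int) (answer : List Int) : Bool :=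
  match scores with
  | [] => decide ((answer.foldl (· + ·) 0) ≤ 25)
  | s :: rest =>
      if s < 7 ∨ s > 18 then false
      -- cost[s]: the guard guarantees the key is present, so getD never uses its default
      else pathfinderLoopA rest (answer ++ [PySem.Dict.getD pfCost s 0])

def pathfinder_scores (scores : List Int) : Bool := pathfinderLoopA scores []

-- ===== PORT B =====
-- Source B: histogram of scores (counts[s] = counts.get(s,0)+1), key-validation against
-- the cost table, then a weighted sum over cost.items() (counts.get(v,0) → getD v 0)
def pathfinder_scores_alt (scores : List Int) : Bool :=
  let counts : PySem.Dict Int Int :=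
    scores.foldl (fun d s => d.insert s (d.getD s 0 + 1)) PySem.Dict.empty
  if counts.keys.any (fun v => !(pfCost.contains v)) then false
  else decide ((pfCost.items.foldl (fun acc p => acc + p.2 * counts.getD p.1 0) 0) ≤ 25)

-- ===== PRECONDITION & SPEC =====
def Spec_pathfinder_scores (scores : List Int) (out : Bool) : Prop := out = pathfinder_scores_alt scores
instance (scores : List Int) (out : Bool) : Decidable (Spec_pathfinder_scores scores out) := by unfold Spec_pathfinder_scores; infer_instance

-- ===== CLAIM (what is proved, stated in full; the proofs are below) =====
def Claim_equal_pathfinder_scores : Prop := ∀ (scores : List Int), Dom_pathfinder_scores scores → Spec_pathfinder_scores scores (pathfinder_scores scores)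

-- ===== LEMMAS AND PROOFS =====

theorem foldl_add_shift (scores : List Int) (a b : Int) :
    scores.foldl (fun acc s => acc + PySem.Dict.getD pfCost s 0) (a + b)
      = a + scores.foldl (fun acc s => acc + PySem.Dict.getD pfCost s 0) b := by
  induction scores generalizing b with
  | nil => simp
  | cons x xs ih =>
      simp only [List.foldl_cons]
      rw [add_assoc, ih]

theorem foldl_sum_append (answer : List Int) (c : Int) :
    (answer ++ [c]).foldl (· + ·) 0 = answer.foldl (· + ·) 0 + c := by
  simp

-- characterisation of A: range-check any, then per-element sum of costs
theorem loopA_eq (scores : List Int) (answer : List Int) :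
    pathfinderLoopA scores answer =
      if scores.any (fun s => decide (s < 7 ∨ s > 18)) then false
      else decide (answer.foldl (· + ·) 0
            + scores.foldl (fun acc s => acc + PySem.Dict.getD pfCost s 0) 0 ≤ 25) := by
  induction scores generalizing answer with
  | nil => simp [pathfinderLoopA]
  | cons x xs ih =>
      simp only [pathfinderLoopA, List.any_cons, List.foldl_cons]
      by_cases h : x < 7 ∨ x > 18
      · simp [h]
      · have hstep : ∀ (c : Int),
            List.foldl (fun acc s => acc + PySem.Dict.getD pfCost s 0) (0 + c) xs
              = c + List.foldl (fun acc s => acc + PySem.Dict.getD pfCost s 0) 0 xs := by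
          intro c
          simpa using foldl_add_shift xs c 0
        simp only [h, decide_false, Bool.false_or, if_false, ih, foldl_sum_append,
          hstep, add_assoc]

-- pfCost as a literal Dict.mk, for evaluating getD/items on concrete keys
theorem pfCost_mk : pfCost = PySem.Dict.mk [(7, -4), (8, -2), (9, -1), (10, 0), (11, 1),
    (12, 2), (13, 3), (14, 5), (15, 7), (16, 10), (17, 13), (18, 17)] := by decide

-- membership in the cost table is exactly the 7..18 range check
theorem pfCost_contains (v : Int) : pfCost.contains v = decide (7 ≤ v ∧ v ≤ 18) := by
  rw [PySem.Dict.contains_eq_decide_mem_keys]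
  have hk : pfCost.keys = [7, 8, 9, 10, 11, 12, 13, 14, 15, 16, 17, 18] := by decide
  rw [hk, decide_eq_decide]
  simp only [List.mem_cons, List.not_mem_nil, or_false]
  omega

-- the histogram's entry for v is the multiplicity of v in scores
theorem counts_getD (scores : List Int) (v : Int) :
    (scores.foldl (fun d s => d.insert s (d.getD s 0 + 1))
        (PySem.Dict.empty : PySem.Dict Int Int)).getD v 0 = (scores.count v : Int) := by
  rw [PySem.Dict.getD_foldl_insert_add_one]
  simp

-- the histogram's keys are the distinct scores
theorem counts_keys (scores : List Int) :
    (scores.foldl (fun d s => d.insert s (d.getD s 0 + 1))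
        (PySem.Dict.empty : PySem.Dict Int Int)).keys = PySem.Set.ofList scores := by
  rw [PySem.Dict.foldl_insert_getD_add_one_eq_counter, PySem.Dict.keys_counter]

-- prepending an in-range score bumps the weighted sum by exactly its cost
theorem weighted_sum_cons (x : Int) (h1 : 7 ≤ x) (h2 : x ≤ 18) (xs : List Int) :
    pfCost.items.foldl (fun acc p => acc + p.2 * ((x :: xs).count p.1 : Int)) 0
      = pfCost.getD x 0 + pfCost.items.foldl (fun acc p => acc + p.2 * (xs.count p.1 : Int)) 0 := by
  interval_cases x <;>
    simp [pfCost_mk, PySem.Dict.getD_eq_get?_getD, PySem.Dict.get?_mk_cons, List.count_cons] <;>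
    push_cast <;> ring

-- weighted sum over the 12 cost entries = per-element sum, when every score is in range
theorem weighted_sum_eq (scores : List Int)
    (h : ∀ s ∈ scores, 7 ≤ s ∧ s ≤ 18) :
    pfCost.items.foldl (fun acc p => acc + p.2 * (scores.count p.1 : Int)) 0
      = scores.foldl (fun acc s => acc + PySem.Dict.getD pfCost s 0) 0 := by
  induction scores with
  | nil => decide
  | cons x xs ih =>
      have hx := h x (List.mem_cons_self)
      have hxs : ∀ s ∈ xs, 7 ≤ s ∧ s ≤ 18 := fun s hs => h s (List.mem_cons_of_mem _ hs)
      simp only [List.foldl_cons]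
      rw [show (0 : Int) + PySem.Dict.getD pfCost x 0 = PySem.Dict.getD pfCost x 0 + 0 by ring,
          foldl_add_shift xs (PySem.Dict.getD pfCost x 0) 0, ← ih hxs,
          weighted_sum_cons x hx.1 hx.2 xs]

-- ===== VERDICT (by name: the statement is the Claim_ definition above) =====
theorem pathfinder_scores_spec : Claim_equal_pathfinder_scores := by
  intro scores _
  unfold Spec_pathfinder_scores pathfinder_scores pathfinder_scores_alt
  rw [loopA_eq]
  simp only [counts_keys]
  by_cases h : scores.any (fun s => decide (s < 7 ∨ s > 18))
  · -- some score out of range: both sides are false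
    rw [if_pos h, if_pos]
    rw [List.any_eq_true] at h ⊢
    obtain ⟨s, hs, hout⟩ := h
    refine ⟨s, (PySem.Set.mem_ofList _ _).mpr hs, ?_⟩
    simp only [pfCost_contains]
    simp only [decide_eq_true_eq] at hout
    simp only [Bool.not_eq_eq_eq_not, Bool.not_true, decide_eq_false_iff_not]
    omega
  · -- all scores in range: validation passes on both sides and the two sums agree
    have hall : ∀ s ∈ scores, 7 ≤ s ∧ s ≤ 18 := by
      intro s hs
      by_contra hc
      exact h (List.any_eq_true.mpr ⟨s, hs, by simp; omega⟩)
    rw [if_neg h, if_neg, List.foldl_nil]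
    · have hcnt : (pfCost.items.foldl (fun acc p => (acc + p.2 *
          ((scores.foldl (fun d s => d.insert s (d.getD s 0 + 1))
            (PySem.Dict.empty : PySem.Dict Int Int)).getD p.1 0))) 0)
          = pfCost.items.foldl (fun acc p => acc + p.2 * (scores.count p.1 : Int)) 0 := by
        simp only [counts_getD]
      rw [hcnt, weighted_sum_eq scores hall]
      simp
    · rw [List.any_eq_true]
      rintro ⟨v, hv, hout⟩
      rw [PySem.Set.mem_ofList] at hv
      have := hall v hv
      simp only [pfCost_contains, Bool.not_eq_eq_eq_not, Bool.not_true,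
        decide_eq_false_iff_not] at hout
      exact hout this
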